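-- pv_equiv track=rewrite | github.com/JulienMaterno/jarvis-sync-service | lib/activitywatch_client.py | categorize_website
-- ===== SOURCE A (Python) =====
-- def categorize_website(domain: str) -> str:
--     """
--     Categorize a website domain as productive, neutral, or distracting.
--
--     Returns: 'productive', 'neutral', or 'distracting'
--     """
--     if not domain:
--         return "neutral"
--
--     domain_lower = domain.lower()
--
--     # Productive domains
--     productive_domains = [
--         "github.com", "gitlab.com", "bitbucket.org",
--         "stackoverflow.com", "stackexchange.com",
--         "docs.google.com", "notion.so", "linear.app",
--         "figma.com", "canva.com",
--         "claude.ai", "chat.openai.com", "chatgpt.com",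
--         "cloud.google.com", "console.aws.amazon.com", "portal.azure.com",
--         "supabase.com", "vercel.com", "netlify.com",
--         "medium.com", "dev.to", "hashnode.com",
--         "udemy.com", "coursera.org", "linkedin.com/learning",
--     ]
--
--     # Distracting domains
--     distracting_domains = [
--         "youtube.com", "netflix.com", "twitch.tv", "disneyplus.com",
--         "twitter.com", "x.com", "facebook.com", "instagram.com", "tiktok.com",
--         "reddit.com", "9gag.com", "imgur.com",
--         "amazon.com", "ebay.com",  # Shopping (usually distracting)
--         "news.ycombinator.com",  # HN can be a time sink
--     ]
--
--     for prod in productive_domains: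
--         if domain_lower == prod or domain_lower.endswith("." + prod):
--             return "productive"
--
--     for dist in distracting_domains:
--         if domain_lower == dist or domain_lower.endswith("." + dist):
--             return "distracting"
--
--     return "neutral"
-- ===== SOURCE B (Python) =====
-- _PRODUCTIVE = frozenset([
--     "github.com", "gitlab.com", "bitbucket.org",
--     "stackoverflow.com", "stackexchange.com",
--     "docs.google.com", "notion.so", "linear.app",
--     "figma.com", "canva.com",
--     "claude.ai", "chat.openai.com", "chatgpt.com",
--     "cloud.google.com", "console.aws.amazon.com", "portal.azure.com",
--     "supabase.com", "vercel.com", "netlify.com",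
--     "medium.com", "dev.to", "hashnode.com",
--     "udemy.com", "coursera.org", "linkedin.com/learning",
-- ])
--
-- _DISTRACTING = frozenset([
--     "youtube.com", "netflix.com", "twitch.tv", "disneyplus.com",
--     "twitter.com", "x.com", "facebook.com", "instagram.com", "tiktok.com",
--     "reddit.com", "9gag.com", "imgur.com",
--     "amazon.com", "ebay.com",
--     "news.ycombinator.com",
-- ])
--
--
-- def categorize_website(domain: str) -> str:
--     """Categorize a domain by looking up its dot-boundary suffixes in fixed sets."""
--     if not domain:
--         return "neutral"
--     d = domain.lower()
--     # the domain itself plus every suffix starting just after a '.'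
--     candidates = [d] + [d[i + 1:] for i, ch in enumerate(d) if ch == '.']
--     if any(c in _PRODUCTIVE for c in candidates):
--         return "productive"
--     if any(c in _DISTRACTING for c in candidates):
--         return "distracting"
--     return "neutral"
-- ===== Notes on version B (the rewrite author's own statement) =====
-- stated objective: idiomatic
-- what changed: Instead of scanning the two fixed domain lists with ==/endswith checks, B enumerates the input's dot-boundary suffixes once and looks each up in frozensets of the fixed domains.
import Mathlib
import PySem

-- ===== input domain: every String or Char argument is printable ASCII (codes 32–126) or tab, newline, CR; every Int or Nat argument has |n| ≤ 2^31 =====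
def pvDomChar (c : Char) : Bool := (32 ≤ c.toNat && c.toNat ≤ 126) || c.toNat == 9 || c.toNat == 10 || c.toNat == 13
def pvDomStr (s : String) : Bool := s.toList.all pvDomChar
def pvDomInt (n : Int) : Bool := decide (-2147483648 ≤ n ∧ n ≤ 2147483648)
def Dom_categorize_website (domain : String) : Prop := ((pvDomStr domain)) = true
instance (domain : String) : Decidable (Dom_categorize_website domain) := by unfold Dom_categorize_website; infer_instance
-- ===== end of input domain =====

-- B replaces A's scan of the fixed lists with ==/endswith by enumerating the input's
-- dot-boundary suffixes once and looking them up in sets (idiomatic; same result).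

-- ===== PORT A =====
def pvProductive : List (List Char) :=
  ["github.com", "gitlab.com", "bitbucket.org",
   "stackoverflow.com", "stackexchange.com",
   "docs.google.com", "notion.so", "linear.app",
   "figma.com", "canva.com",
   "claude.ai", "chat.openai.com", "chatgpt.com",
   "cloud.google.com", "console.aws.amazon.com", "portal.azure.com",
   "supabase.com", "vercel.com", "netlify.com",
   "medium.com", "dev.to", "hashnode.com",
   "udemy.com", "coursera.org", "linkedin.com/learning"].map String.toList

def pvDistracting : List (List Char) :=
  ["youtube.com", "netflix.com", "twitch.tv", "disneyplus.com",
   "twitter.com", "x.com", "facebook.com", "instagram.com", "tiktok.com",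
   "reddit.com", "9gag.com", "imgur.com",
   "amazon.com", "ebay.com",
   "news.ycombinator.com"].map String.toList

-- A's loop: for p in doms: if d == p or d.endswith("." + p): return True
def pvLoopA (d : List Char) : List (List Char) → Bool
  | [] => false
  | p :: rest =>
    if d = p ∨ PySem.Chars.endswith d ('.' :: p) then true else pvLoopA d rest

def categorize_website (domain : String) : String :=
  if domain.toList = [] then "neutral"
  else
    let d := PySem.Chars.lower domain.toList
    if pvLoopA d pvProductive then "productive"
    else if pvLoopA d pvDistracting then "distracting"
    else "neutral"

-- ===== PORT B =====
def pvProductiveSet : PySem.Set (List Char) := PySem.Set.ofList pvProductive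
def pvDistractingSet : PySem.Set (List Char) := PySem.Set.ofList pvDistracting

-- [d[i+1:] for i, ch in enumerate(d) if ch == '.']
def pvDotSuffixes : List Char → List (List Char)
  | [] => []
  | c :: cs => if c = '.' then cs :: pvDotSuffixes cs else pvDotSuffixes cs

def categorize_website_alt (domain : String) : String :=
  if domain.toList = [] then "neutral"
  else
    let d := PySem.Chars.lower domain.toList
    let cands := d :: pvDotSuffixes d
    if cands.any (fun c => PySem.Set.contains pvProductiveSet c) then "productive"
    else if cands.any (fun c => PySem.Set.contains pvDistractingSet c) then "distracting"
    else "neutral"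

-- ===== PRECONDITION & SPEC =====
def Spec_categorize_website (domain : String) (out : String) : Prop := out = categorize_website_alt domain
instance (domain : String) (out : String) : Decidable (Spec_categorize_website domain out) := by unfold Spec_categorize_website; infer_instance

-- ===== CLAIM (what is proved, stated in full; the proofs are below) =====
def Claim_equal_categorize_website : Prop := ∀ (domain : String), Dom_categorize_website domain → Spec_categorize_website domain (categorize_website domain)

-- ===== LEMMAS AND PROOFS =====

-- membership in the dot-suffix list is exactly "suffix right after a dot"
theorem mem_pvDotSuffixes (d c : List Char) :
    c ∈ pvDotSuffixes d ↔ ('.' :: c) <:+ d := by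
  induction d with
  | nil => simp [pvDotSuffixes]
  | cons a cs ih =>
    rw [List.suffix_cons_iff]
    by_cases ha : a = '.'
    · subst ha
      simp [pvDotSuffixes, ih]
    · simp only [pvDotSuffixes, if_neg ha, ih, List.cons_eq_cons]
      constructor
      · exact fun h => Or.inr h
      · rintro (⟨heq, -⟩ | h)
        · exact absurd heq.symm ha
        · exact h

-- A's loop over a fixed list of domains, characterised
theorem loopA_iff (d : List Char) (doms : List (List Char)) :
    pvLoopA d doms = true ↔ ∃ p ∈ doms, d = p ∨ ('.' :: p) <:+ d := by
  induction doms with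
  | nil => simp [pvLoopA]
  | cons p rest ih =>
    simp only [pvLoopA]
    split_ifs with hc
    · simp only [true_iff]
      refine ⟨p, List.mem_cons_self, ?_⟩
      rcases hc with rfl | hc
      · exact Or.inl rfl
      · exact Or.inr ((PySem.Chars.endswith_iff d ('.' :: p)).mp hc)
    · rw [ih]
      constructor
      · rintro ⟨q, hq, h⟩
        exact ⟨q, List.mem_cons_of_mem _ hq, h⟩
      · rintro ⟨q, hq, h⟩
        rcases List.mem_cons.mp hq with rfl | hq'
        · refine absurd ?_ hc
          rcases h with rfl | h
          · exact Or.inl rfl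
          · exact Or.inr ((PySem.Chars.endswith_iff d ('.' :: q)).mpr h)
        · exact ⟨q, hq', h⟩

-- A's loop equals B's candidate-membership test, for any fixed domain list
theorem loopA_eq_any (d : List Char) (doms : List (List Char)) :
    pvLoopA d doms = (d :: pvDotSuffixes d).any
      (fun c => PySem.Set.contains (PySem.Set.ofList doms) c) := by
  rw [Bool.eq_iff_iff, loopA_iff, List.any_eq_true]
  constructor
  · rintro ⟨p, hp, hdp | hsuf⟩
    · exact ⟨d, List.mem_cons_self, by
        rw [PySem.Set.contains_iff, PySem.Set.mem_ofList, hdp]; exact hp⟩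
    · exact ⟨p, List.mem_cons_of_mem _ ((mem_pvDotSuffixes d p).mpr hsuf), by
        rw [PySem.Set.contains_iff, PySem.Set.mem_ofList]; exact hp⟩
  · rintro ⟨c, hc, hmem⟩
    rw [PySem.Set.contains_iff, PySem.Set.mem_ofList] at hmem
    refine ⟨c, hmem, ?_⟩
    rcases List.mem_cons.mp hc with rfl | hc'
    · exact Or.inl rfl
    · exact Or.inr ((mem_pvDotSuffixes d c).mp hc')

-- ===== VERDICT (by name: the statement is the Claim_ definition above) =====
theorem categorize_website_spec : Claim_equal_categorize_website := by
  intro domain _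
  unfold Spec_categorize_website categorize_website categorize_website_alt
  by_cases h : domain.toList = []
  · simp [h]
  · simp only [if_neg h, pvProductiveSet, pvDistractingSet,
      loopA_eq_any (PySem.Chars.lower domain.toList) pvProductive,
      loopA_eq_any (PySem.Chars.lower domain.toList) pvDistracting]
    rfl
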